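-- pv_equiv track=rewrite | github.com/kicsikrumpli/adventofcode2020 | day14/puzzle_b.py | substitutions
-- ===== SOURCE A (Python) =====
-- from typing import Dict, Optional, Generator, List
--
-- def substitutions(s: str, substs: Dict[str, str] = None) -> List[str]:
--     """
--     Substitute characters in s from substitution dictionary.
--     If a character is mapped to multiple charecters, all possible substitutions are returned.
--     If a character is not in substitution dict, it is left the same
--
--     >>> substitutions('0101')
--     ['0101']
--
--     >>> substitutions('010X')
--     ['0100', '0101']
--
--     >>> substitutions('X10X')
--     ['0100', '0101', '1100', '1101']
--
--     >>> substitutions('0101', {'0': '1', '1': '0'})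
--     ['1010']
--
--     >>> substitutions('010X', {'0': '1', 'X': '01'})
--     ['1110', '1111']
--
--     :param s: string to make substitutions in
--     :param substs: substitutions dict
--     :return: all possible substitutions
--     """
--     if not substs:
--         substs = {
--             'X': '01',
--             '1': '1',
--             '0': '0'
--         }
--     if not s:
--         return ['']
--
--     vocab = substs.get(s[0], s[0])
--     return [
--         "".join([digit, *rest])
--         for digit in vocab
--         for rest in substitutions(s[1:], substs)
--     ]
-- ===== SOURCE B (Python) =====
-- def substitutions(s, substs=None):
--     """Iterative left-to-right expansion: the partial-result list is built once
--     per position instead of recomputing the recursive tail per vocab char."""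
--     if not substs:
--         substs = {'X': '01', '1': '1', '0': '0'}
--     results = ['']
--     for ch in s:
--         vocab = substs.get(ch, ch)
--         results = [r + d for r in results for d in vocab]
--     return results
-- ===== Notes on version B (the rewrite author's own statement) =====
-- stated objective: faster
-- what changed: Replaced the recursion that re-evaluates substitutions(s[1:]) inside the comprehension for every vocab character with a single left-to-right loop that extends one partial-result list per position.
import Mathlib
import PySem

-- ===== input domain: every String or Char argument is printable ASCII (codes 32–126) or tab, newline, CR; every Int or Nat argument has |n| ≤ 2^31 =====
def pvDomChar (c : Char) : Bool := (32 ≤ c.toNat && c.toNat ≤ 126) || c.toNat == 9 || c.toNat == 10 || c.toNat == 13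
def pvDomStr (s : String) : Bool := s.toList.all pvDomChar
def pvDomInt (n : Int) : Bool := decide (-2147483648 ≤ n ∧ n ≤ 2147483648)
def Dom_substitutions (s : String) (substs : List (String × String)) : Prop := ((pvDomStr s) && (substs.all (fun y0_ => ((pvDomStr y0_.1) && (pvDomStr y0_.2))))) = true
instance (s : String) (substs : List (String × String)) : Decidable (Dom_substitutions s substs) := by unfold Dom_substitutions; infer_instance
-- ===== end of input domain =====

-- B replaces A's per-vocab-char recomputation of the recursive tail by one left-to-right
-- loop that extends a single partial-result list per position (objective: faster).

-- ===== PORT A =====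
-- substs.get(k, k): first-match lookup in the association list, default = the key itself
def pvGetD (d : List (String × String)) (k : String) : String :=
  ((d.find? (fun p => p.1 == k)).map (·.2)).getD k

-- the default substitution dict used when substs is falsy (empty)
def pvDefaultSubsts : List (String × String) :=
  [("X", "01"), ("1", "1"), ("0", "0")]

-- A's recursion on the string, character by character; the recursive call
-- substitutions(s[1:], substs) sits INSIDE the lambda over vocab chars, as in A's
-- list comprehension ["".join([digit, *rest]) for digit in vocab for rest in …].
def pvSubstA (cs : List Char) (d : List (String × String)) : List String :=
  match cs with
  | [] => [""]
  | c :: rest =>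
      let vocab := (pvGetD d (String.ofList [c])).toList
      vocab.flatMap (fun digit =>
        (pvSubstA rest d).map (fun r => String.ofList (digit :: r.toList)))

def substitutions (s : String) (substs : List (String × String)) : List String :=
  let d := if substs = [] then pvDefaultSubsts else substs
  pvSubstA s.toList d

-- ===== PORT B =====
-- one loop step: results = [r + d for r in results for d in vocab]
def pvStepB (d : List (String × String)) (results : List String) (c : Char) : List String :=
  let vocab := (pvGetD d (String.ofList [c])).toList
  results.flatMap (fun r => vocab.map (fun digit => r ++ String.ofList [digit]))

def substitutions_alt (s : String) (substs : List (String × String)) : List String :=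
  let d := if substs = [] then pvDefaultSubsts else substs
  s.toList.foldl (pvStepB d) [""]

-- ===== PRECONDITION & SPEC =====
def Spec_substitutions (s : String) (substs : List (String × String)) (out : List String) : Prop := out = substitutions_alt s substs
instance (s : String) (substs : List (String × String)) (out : List String) : Decidable (Spec_substitutions s substs out) := by unfold Spec_substitutions; infer_instance

-- ===== CLAIM (what is proved, stated in full; the proofs are below) =====
def Claim_equal_substitutions : Prop := ∀ (s : String) (substs : List (String × String)), Dom_substitutions s substs → Spec_substitutions s substs (substitutions s substs)

-- ===== LEMMAS AND PROOFS =====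

-- invariant of B's loop: folding over the remaining characters appends every
-- suffix expansion (A's value on that suffix) to every accumulated prefix
theorem pvFoldB_eq (d : List (String × String)) (cs : List Char) :
    ∀ acc : List String,
      cs.foldl (pvStepB d) acc =
        acc.flatMap (fun r => (pvSubstA cs d).map (fun t => r ++ t)) := by
  induction cs with
  | nil =>
      intro acc
      simp [pvSubstA, List.flatMap_singleton', String.append_empty]
  | cons c rest ih =>
      intro acc
      simp only [List.foldl_cons, ih, pvSubstA, pvStepB, List.flatMap_assoc,
        List.flatMap_map, List.map_flatMap, List.map_map]
      apply List.flatMap_congr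
      intro r _
      apply List.flatMap_congr
      intro digit _
      apply List.map_congr_left
      intro t _
      apply String.ext
      simp

theorem pvAB_eq (d : List (String × String)) (cs : List Char) :
    cs.foldl (pvStepB d) [""] = pvSubstA cs d := by
  rw [pvFoldB_eq]
  simp

-- ===== VERDICT (by name: the statement is the Claim_ definition above) =====
theorem substitutions_spec : Claim_equal_substitutions := by
  intro s substs _
  unfold Spec_substitutions substitutions substitutions_alt
  rw [pvAB_eq]
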